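-- pv_equiv track=rewrite | github.com/yashsinha1702/TrustSight-Hackon | backend/listing.py | _are_types_related
-- ===== SOURCE A (Python) =====
-- def _are_types_related(type1: str, type2: str) -> bool:
--     """Check if two product types are related"""
--     # Related product groups
--     related_groups = [
--         {'phone', 'case', 'screen', 'cable', 'charger'},
--         {'laptop', 'case', 'charger', 'mouse', 'keyboard'},
--         {'watch', 'band', 'strap'},
--         {'shoe', 'lace', 'insole'},
--         {'clothing', 'belt', 'scarf'}
--     ]
--
--     for group in related_groups:
--         if type1 in group and type2 in group:
--             return True
--
--     return False
-- ===== SOURCE B (Python) =====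
-- _GROUP_INDEX = {
--     'phone': {0}, 'screen': {0}, 'cable': {0},
--     'case': {0, 1}, 'charger': {0, 1},
--     'laptop': {1}, 'mouse': {1}, 'keyboard': {1},
--     'watch': {2}, 'band': {2}, 'strap': {2},
--     'shoe': {3}, 'lace': {3}, 'insole': {3},
--     'clothing': {4}, 'belt': {4}, 'scarf': {4},
-- }
--
--
-- def _are_types_related(type1: str, type2: str) -> bool:
--     """Check if two product types are related via a precomputed inverted index."""
--     return bool(_GROUP_INDEX.get(type1, set()) & _GROUP_INDEX.get(type2, set()))
-- ===== Notes on version B (the rewrite author's own statement) =====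
-- stated objective: idiomatic
-- what changed: Replaces the per-query scan over the five groups (two membership tests each) by a module-level inverted index mapping each product type to the set of group indices containing it; a query is two dict lookups and a set intersection.
import Mathlib
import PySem

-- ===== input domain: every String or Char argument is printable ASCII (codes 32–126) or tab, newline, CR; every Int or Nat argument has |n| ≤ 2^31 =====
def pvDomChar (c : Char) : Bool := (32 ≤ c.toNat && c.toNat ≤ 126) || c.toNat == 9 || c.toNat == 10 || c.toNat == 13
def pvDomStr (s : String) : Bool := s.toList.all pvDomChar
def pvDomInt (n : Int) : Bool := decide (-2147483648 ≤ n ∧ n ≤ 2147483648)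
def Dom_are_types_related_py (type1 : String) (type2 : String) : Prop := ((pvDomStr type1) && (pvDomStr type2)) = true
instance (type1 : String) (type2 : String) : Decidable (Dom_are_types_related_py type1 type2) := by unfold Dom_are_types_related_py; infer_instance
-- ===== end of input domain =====

-- B replaces A's per-query scan over the five groups by a precomputed inverted index
-- (type -> set of group indices) queried with two lookups and a set intersection (idiomatic; same observable results).

-- ===== PORT A =====
def pvRelatedGroups : List (PySem.Set String) :=
  [PySem.Set.ofList ["phone", "case", "screen", "cable", "charger"],
   PySem.Set.ofList ["laptop", "case", "charger", "mouse", "keyboard"],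
   PySem.Set.ofList ["watch", "band", "strap"],
   PySem.Set.ofList ["shoe", "lace", "insole"],
   PySem.Set.ofList ["clothing", "belt", "scarf"]]

-- the for-loop with early 'return True'
def pvLoopA (t1 t2 : String) : List (PySem.Set String) → Bool
  | [] => false
  | g :: rest =>
      if PySem.Set.contains g t1 && PySem.Set.contains g t2 then true else pvLoopA t1 t2 rest

def are_types_related_py (type1 : String) (type2 : String) : Bool :=
  pvLoopA type1 type2 pvRelatedGroups

-- ===== PORT B =====
-- the module-level inverted index _GROUP_INDEX
def pvGroupIndex : PySem.Dict String (PySem.Set Int) :=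
  PySem.Dict.ofList [("phone", PySem.Set.ofList [(0:Int)]), ("screen", PySem.Set.ofList [(0:Int)]), ("cable", PySem.Set.ofList [(0:Int)]),
   ("case", PySem.Set.ofList [(0:Int), 1]), ("charger", PySem.Set.ofList [(0:Int), 1]),
   ("laptop", PySem.Set.ofList [(1:Int)]), ("mouse", PySem.Set.ofList [(1:Int)]), ("keyboard", PySem.Set.ofList [(1:Int)]),
   ("watch", PySem.Set.ofList [(2:Int)]), ("band", PySem.Set.ofList [(2:Int)]), ("strap", PySem.Set.ofList [(2:Int)]),
   ("shoe", PySem.Set.ofList [(3:Int)]), ("lace", PySem.Set.ofList [(3:Int)]), ("insole", PySem.Set.ofList [(3:Int)]),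
   ("clothing", PySem.Set.ofList [(4:Int)]), ("belt", PySem.Set.ofList [(4:Int)]), ("scarf", PySem.Set.ofList [(4:Int)])]

def are_types_related_py_alt (type1 : String) (type2 : String) : Bool :=
  !(PySem.Set.inter (PySem.Dict.getD pvGroupIndex type1 PySem.Set.empty)
                    (PySem.Dict.getD pvGroupIndex type2 PySem.Set.empty)).isEmpty

-- ===== PRECONDITION & SPEC =====
def Spec_are_types_related_py (type1 : String) (type2 : String) (out : Bool) : Prop := out = are_types_related_py_alt type1 type2
instance (type1 : String) (type2 : String) (out : Bool) : Decidable (Spec_are_types_related_py type1 type2 out) := by unfold Spec_are_types_related_py; infer_instance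

-- ===== CLAIM (what is proved, stated in full; the proofs are below) =====
def Claim_equal_are_types_related_py : Prop := ∀ (type1 : String) (type2 : String), Dom_are_types_related_py type1 type2 → Spec_are_types_related_py type1 type2 (are_types_related_py type1 type2)

-- ===== LEMMAS AND PROOFS =====
-- the 17 product types that occur in A's groups (= the keys of B's index)
def pvWords : List String :=
  ["phone", "case", "screen", "cable", "charger", "laptop", "mouse", "keyboard",
   "watch", "band", "strap", "shoe", "lace", "insole", "clothing", "belt", "scarf"]

theorem notWord_left (t1 t2 : String) (h : t1 ∉ pvWords) :
    are_types_related_py t1 t2 = false := by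
  simp only [pvWords, List.mem_cons, not_or] at h
  obtain ⟨a1,a2,a3,a4,a5,a6,a7,a8,a9,a10,a11,a12,a13,a14,a15,a16,a17,-⟩ := h
  simp [are_types_related_py, pvLoopA, pvRelatedGroups, PySem.Set.contains, PySem.Set.ofList,
        PySem.Set.add, a1,a2,a3,a4,a5,a6,a7,a8,a9,a10,a11,a12,a13,a14,a15,a16,a17]

theorem notWord_right (t1 t2 : String) (h : t2 ∉ pvWords) :
    are_types_related_py t1 t2 = false := by
  simp only [pvWords, List.mem_cons, not_or] at h
  obtain ⟨a1,a2,a3,a4,a5,a6,a7,a8,a9,a10,a11,a12,a13,a14,a15,a16,a17,-⟩ := h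
  simp [are_types_related_py, pvLoopA, pvRelatedGroups, PySem.Set.contains, PySem.Set.ofList,
        PySem.Set.add, a1,a2,a3,a4,a5,a6,a7,a8,a9,a10,a11,a12,a13,a14,a15,a16,a17]

theorem getD_notWord (t : String) (h : t ∉ pvWords) :
    PySem.Dict.getD pvGroupIndex t PySem.Set.empty = PySem.Set.empty := by
  simp only [pvWords, List.mem_cons, not_or] at h
  obtain ⟨a1,a2,a3,a4,a5,a6,a7,a8,a9,a10,a11,a12,a13,a14,a15,a16,a17,-⟩ := h
  have b1 : (pvWords[0]! == t) = false := beq_eq_false_iff_ne.mpr (Ne.symm a1)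
  have b2 : (pvWords[1]! == t) = false := beq_eq_false_iff_ne.mpr (Ne.symm a2)
  have b3 : (pvWords[2]! == t) = false := beq_eq_false_iff_ne.mpr (Ne.symm a3)
  have b4 : (pvWords[3]! == t) = false := beq_eq_false_iff_ne.mpr (Ne.symm a4)
  have b5 : (pvWords[4]! == t) = false := beq_eq_false_iff_ne.mpr (Ne.symm a5)
  have b6 : (pvWords[5]! == t) = false := beq_eq_false_iff_ne.mpr (Ne.symm a6)
  have b7 : (pvWords[6]! == t) = false := beq_eq_false_iff_ne.mpr (Ne.symm a7)
  have b8 : (pvWords[7]! == t) = false := beq_eq_false_iff_ne.mpr (Ne.symm a8)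
  have b9 : (pvWords[8]! == t) = false := beq_eq_false_iff_ne.mpr (Ne.symm a9)
  have b10 : (pvWords[9]! == t) = false := beq_eq_false_iff_ne.mpr (Ne.symm a10)
  have b11 : (pvWords[10]! == t) = false := beq_eq_false_iff_ne.mpr (Ne.symm a11)
  have b12 : (pvWords[11]! == t) = false := beq_eq_false_iff_ne.mpr (Ne.symm a12)
  have b13 : (pvWords[12]! == t) = false := beq_eq_false_iff_ne.mpr (Ne.symm a13)
  have b14 : (pvWords[13]! == t) = false := beq_eq_false_iff_ne.mpr (Ne.symm a14)
  have b15 : (pvWords[14]! == t) = false := beq_eq_false_iff_ne.mpr (Ne.symm a15)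
  have b16 : (pvWords[15]! == t) = false := beq_eq_false_iff_ne.mpr (Ne.symm a16)
  have b17 : (pvWords[16]! == t) = false := beq_eq_false_iff_ne.mpr (Ne.symm a17)
  simp only [pvWords, List.getElem!_cons_succ, List.getElem!_cons_zero] at *
  simp [pvGroupIndex, PySem.Dict.getD, PySem.Dict.get?, PySem.Dict.ofList,
        PySem.Dict.update, PySem.Dict.insert, PySem.Dict.contains, PySem.Dict.empty, List.find?,
        b1,b2,b3,b4,b5,b6,b7,b8,b9,b10,b11,b12,b13,b14,b15,b16,b17]

theorem notWord_alt_left (t1 t2 : String) (h : t1 ∉ pvWords) :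
    are_types_related_py_alt t1 t2 = false := by
  have h0 := getD_notWord t1 h
  simp only [PySem.Set.empty] at h0
  simp [are_types_related_py_alt, PySem.Set.empty, h0, PySem.Set.inter]

theorem notWord_alt_right (t1 t2 : String) (h : t2 ∉ pvWords) :
    are_types_related_py_alt t1 t2 = false := by
  have h0 := getD_notWord t2 h
  simp only [PySem.Set.empty] at h0
  simp [are_types_related_py_alt, PySem.Set.empty, h0, PySem.Set.inter]

theorem main_eq (t1 t2 : String) : are_types_related_py t1 t2 = are_types_related_py_alt t1 t2 := by
  by_cases h1 : t1 ∈ pvWords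
  · by_cases h2 : t2 ∈ pvWords
    · fin_cases h1 <;> fin_cases h2 <;> decide
    · have := notWord_right t1 t2 h2
      have := notWord_alt_right t1 t2 h2
      simp_all
  · have := notWord_left t1 t2 h1
    have := notWord_alt_left t1 t2 h1
    simp_all

-- ===== VERDICT (by name: the statement is the Claim_ definition above) =====
theorem are_types_related_py_spec : Claim_equal_are_types_related_py := by
  intro t1 t2 _
  exact main_eq t1 t2
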